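-- pv_equiv track=rewrite | github.com/CdrBlair/advent_of_code_python | twentythree_day9.py | calc_deep_sequence
-- ===== SOURCE A (Python) =====
-- def calc_deep_sequence(start_sequence):
--     next_sequences = []
--     next_sequence = []
--     for i, num in enumerate(start_sequence):
--         if i + 1 < len(start_sequence):
--             next_sequence.append(start_sequence[i + 1] - num)
--     next_sequences.append(next_sequence)
--
--     if all([num == 0 for num in next_sequence]):
--         next_sequences[-1].append(0)
--         next_sequences[-1].insert(0, 0)
--         return next_sequences
--     else:
--         next_sequences.extend(calc_deep_sequence(next_sequences[-1]))
--         next_sequences[0].append(next_sequences[1][-1] + next_sequences[0][-1])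
--         next_sequences[0].insert(0, next_sequences[0][0] - next_sequences[1][0])
--         return next_sequences
-- ===== SOURCE B (Python) =====
-- def calc_deep_sequence(start_sequence):
--     # Two-phase iterative version: build all difference levels first,
--     # then extend them bottom-up.
--     levels = []
--     seq = start_sequence
--     while True:
--         seq = [seq[i + 1] - seq[i] for i in range(len(seq) - 1)]
--         levels.append(seq)
--         if all(n == 0 for n in seq):
--             break
--     # pad the all-zero bottom level
--     levels[-1].insert(0, 0)
--     levels[-1].append(0)
--     # extend every level above it, bottom-up, using the already-extended child
--     for i in range(len(levels) - 2, -1, -1):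
--         parent, child = levels[i], levels[i + 1]
--         parent.append(child[-1] + parent[-1])
--         parent.insert(0, parent[0] - child[0])
--     return levels
-- ===== Notes on version B (the rewrite author's own statement) =====
-- stated objective: alternative
-- what changed: A builds the pyramid by one interleaved recursion that extends each level's endpoints as the recursion unwinds; B is iterative and two-phase: a while-loop first collects all difference levels until an all-zero one, then a separate bottom-up pass pads the bottom level and extends each level from its already-extended child.
import Mathlib
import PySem

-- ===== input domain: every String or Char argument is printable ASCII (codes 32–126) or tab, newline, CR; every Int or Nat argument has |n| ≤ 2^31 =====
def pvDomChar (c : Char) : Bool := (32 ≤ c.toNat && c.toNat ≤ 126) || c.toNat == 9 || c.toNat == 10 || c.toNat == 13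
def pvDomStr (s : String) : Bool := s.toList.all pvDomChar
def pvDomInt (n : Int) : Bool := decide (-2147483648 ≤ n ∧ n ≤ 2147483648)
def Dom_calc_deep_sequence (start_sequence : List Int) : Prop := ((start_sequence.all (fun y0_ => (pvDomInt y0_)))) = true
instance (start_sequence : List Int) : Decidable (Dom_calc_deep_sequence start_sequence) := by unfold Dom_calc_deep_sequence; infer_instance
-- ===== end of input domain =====

-- B computes the same pyramid in two separate phases (build all difference levels
-- iteratively, then extend them bottom-up) instead of A's single interleaved
-- recursion; objective: alternative decomposition, not speed.

-- ===== PORT A =====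
-- literal port of A's `for i, num in enumerate(start_sequence)` loop building next_sequence
-- (the xs[i+1] access is guarded by i+1 < len(xs), so the default of pyGetD is never used)
def aDiff (xs : List Int) : List Int :=
  (PySem.List.enumerate xs).foldl
    (fun acc p => if p.1 + 1 < (xs.length : Int)
                  then acc ++ [PySem.List.pyGetD xs (p.1 + 1) 0 - p.2] else acc) []

-- diff of consecutive elements as Source B's comprehension computes it; also the
-- recursion measure fact both ports' termination proofs cite
def bDiff (xs : List Int) : List Int := List.zipWith (fun a b => b - a) xs xs.tail

theorem length_bDiff (xs : List Int) : (bDiff xs).length = xs.length - 1 := by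
  simp [bDiff]

-- A's index-based loop computes exactly Source B's consecutive-difference list
theorem aDiff_aux (xs : List Int) : ∀ (l : List Int) (k : Nat) (acc : List Int),
    xs.drop k = l →
    ((PySem.List.enumerate l (k : Int)).foldl
      (fun acc p => if p.1 + 1 < (xs.length : Int)
                    then acc ++ [PySem.List.pyGetD xs (p.1 + 1) 0 - p.2] else acc) acc)
      = acc ++ bDiff l := by
  intro l
  induction l with
  | nil => intro k acc _; simp [PySem.List.enumerate_nil, bDiff]
  | cons x l ih =>
    intro k acc hd
    have hk : k < xs.length := by
      by_contra hcon
      have : xs.drop k = [] := List.drop_eq_nil_of_le (by omega)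
      simp [this] at hd
    have hdt : xs.drop (k + 1) = l := by
      rw [← List.tail_drop, hd]; rfl
    rw [PySem.List.enumerate_cons]
    simp only [List.foldl_cons]
    have hcast : (k : Int) + 1 = ((k + 1 : Nat) : Int) := by push_cast; ring
    cases l with
    | nil =>
      have hlen : xs.length ≤ k + 1 := by
        have := List.drop_eq_nil_iff.mp hdt; omega
      have hguard : ¬ ((k : Int) + 1 < (xs.length : Int)) := by omega
      rw [if_neg hguard]
      simp [PySem.List.enumerate_nil, bDiff]
    | cons y l' =>
      have hlen : k + 1 < xs.length := by
        have hlem := List.length_drop (i := k+1) (l := xs)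
        rw [hdt] at hlem; simp at hlem; omega
      have hguard : (k : Int) + 1 < (xs.length : Int) := by omega
      rw [if_pos hguard]
      have hget : PySem.List.pyGetD xs ((k : Int) + 1) 0 = y := by
        rw [hcast, PySem.List.pyGetD_natCast]
        have h0 : xs[k + 1]? = (xs.drop (k+1))[0]? := by
          rw [List.getElem?_drop]
        rw [List.getD_eq_getElem?_getD, h0, hdt]
        rfl
      rw [hget, hcast,
          ih (k + 1) (acc ++ [y - x]) hdt]
      simp [bDiff]

theorem aDiff_eq_bDiff (xs : List Int) : aDiff xs = bDiff xs := by
  have := aDiff_aux xs xs 0 [] (by simp)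
  simpa [aDiff] using this


def calc_deep_sequence (start_sequence : List Int) : List (List Int) :=
  if h : (aDiff start_sequence).all (fun n => n == 0) then
    [0 :: (aDiff start_sequence ++ [0])]
  else
    let rest := calc_deep_sequence (aDiff start_sequence)
    let d1 := aDiff start_sequence ++ [rest.head!.getLast! + (aDiff start_sequence).getLast!]
    ((d1.head! - rest.head!.head!) :: d1) :: rest
termination_by start_sequence.length
decreasing_by
  have hne : aDiff start_sequence ≠ [] := by
    intro hnil; rw [hnil] at h; simp at h
  have hlen : (aDiff start_sequence).length = start_sequence.length - 1 := by
    rw [aDiff_eq_bDiff]; exact length_bDiff _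
  have : 0 < (aDiff start_sequence).length := List.length_pos_iff.mpr hne
  omega

-- ===== PORT B =====
-- phase 1 of Source B: the while-loop collecting difference levels until an all-zero one
def buildLevels (xs : List Int) : List (List Int) :=
  if _h : (bDiff xs).all (fun n => n == 0) then [bDiff xs]
  else bDiff xs :: buildLevels (bDiff xs)
termination_by xs.length
decreasing_by
  have hne : bDiff xs ≠ [] := by
    intro hnil; rw [hnil] at _h; simp at _h
  have := length_bDiff xs
  have : 0 < (bDiff xs).length := List.length_pos_iff.mpr hne
  omega

-- phase 2 of Source B: pad the all-zero bottom level, then the downward for-loop that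
-- extends each parent from its already-extended child (bottom-up = recursion on the tail)
def extendUp : List (List Int) → List (List Int)
  | [] => []
  | [l] => [0 :: (l ++ [0])]
  | p :: c :: rest =>
      let rest' := extendUp (c :: rest)
      let p1 := p ++ [rest'.head!.getLast! + p.getLast!]
      ((p1.head! - rest'.head!.head!) :: p1) :: rest'

def calc_deep_sequence_alt (start_sequence : List Int) : List (List Int) :=
  extendUp (buildLevels start_sequence)

-- ===== PRECONDITION & SPEC =====
def Spec_calc_deep_sequence (start_sequence : List Int) (out : List (List Int)) : Prop := out = calc_deep_sequence_alt start_sequence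
instance (start_sequence : List Int) (out : List (List Int)) : Decidable (Spec_calc_deep_sequence start_sequence out) := by unfold Spec_calc_deep_sequence; infer_instance

-- ===== CLAIM (what is proved, stated in full; the proofs are below) =====
def Claim_equal_calc_deep_sequence : Prop := ∀ (start_sequence : List Int), Dom_calc_deep_sequence start_sequence → Spec_calc_deep_sequence start_sequence (calc_deep_sequence start_sequence)

-- ===== LEMMAS AND PROOFS =====

theorem buildLevels_ne_nil (xs : List Int) : buildLevels xs ≠ [] := by
  rw [buildLevels]; split <;> simp

theorem main_eq (xs : List Int) : calc_deep_sequence xs = calc_deep_sequence_alt xs := by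
  induction xs using calc_deep_sequence.induct with
  | case1 xs h =>
    rw [calc_deep_sequence, dif_pos h, calc_deep_sequence_alt, buildLevels,
        ← aDiff_eq_bDiff, dif_pos h, extendUp]
  | case2 xs h ih =>
    rw [calc_deep_sequence, dif_neg h, calc_deep_sequence_alt, buildLevels,
        ← aDiff_eq_bDiff, dif_neg h]
    rcases hbl : buildLevels (aDiff xs) with _ | ⟨hd, tl⟩
    · exact absurd hbl (buildLevels_ne_nil _)
    · rw [extendUp, ← hbl]
      have hrest : extendUp (buildLevels (aDiff xs)) = calc_deep_sequence (aDiff xs) := by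
        rw [← calc_deep_sequence_alt, ih]
      rw [hrest]

-- ===== VERDICT (by name: the statement is the Claim_ definition above) =====
theorem calc_deep_sequence_spec : Claim_equal_calc_deep_sequence := by
  intro xs _
  unfold Spec_calc_deep_sequence
  exact main_eq xs
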